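-- pv_equiv track=rewrite | github.com/JanHouser/pg | fourth.py | je_tah_mozny_vez
-- ===== SOURCE A (Python) =====
-- def je_tah_mozny_vez(vez, cilova_pozce, obsazene_pozice):
--     r, s = vez
--     r2, s2 = cilova_pozce
--
--     if (r2, s2) in obsazene_pozice:
--         return False
--
--     if r != r2 and s != s2:
--         return False
--
--     if r == r2:
--         for i in range(min(s, s2) + 1, max(s, s2)):
--             if (r, i) in obsazene_pozice:
--                 return False
--
--     else:
--         for i in range(min(r, r2) + 1, max(r, r2)):
--             if (i, s) in obsazene_pozice:
--                 return False
--     return True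
-- ===== SOURCE B (Python) =====
-- def je_tah_mozny_vez(vez, cilova_pozce, obsazene_pozice):
--     r, s = vez
--     r2, s2 = cilova_pozce
--     if r != r2 and s != s2:
--         return False
--     for (a, b) in obsazene_pozice:
--         if (a, b) == (r2, s2):
--             return False
--         if r == r2:
--             if a == r and min(s, s2) < b < max(s, s2):
--                 return False
--         else:
--             if b == s and min(r, r2) < a < max(r, r2):
--                 return False
--     return True
-- ===== Notes on version B (the rewrite author's own statement) =====
-- stated objective: alternative
-- what changed: Instead of scanning every square on the rook's path and probing the occupied list for each (O(path*|occ|)), B makes a single pass over the occupied positions, flagging a blocker if it is the target square or lies strictly between source and target on the shared rank/file (O(|occ|)).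
import Mathlib
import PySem

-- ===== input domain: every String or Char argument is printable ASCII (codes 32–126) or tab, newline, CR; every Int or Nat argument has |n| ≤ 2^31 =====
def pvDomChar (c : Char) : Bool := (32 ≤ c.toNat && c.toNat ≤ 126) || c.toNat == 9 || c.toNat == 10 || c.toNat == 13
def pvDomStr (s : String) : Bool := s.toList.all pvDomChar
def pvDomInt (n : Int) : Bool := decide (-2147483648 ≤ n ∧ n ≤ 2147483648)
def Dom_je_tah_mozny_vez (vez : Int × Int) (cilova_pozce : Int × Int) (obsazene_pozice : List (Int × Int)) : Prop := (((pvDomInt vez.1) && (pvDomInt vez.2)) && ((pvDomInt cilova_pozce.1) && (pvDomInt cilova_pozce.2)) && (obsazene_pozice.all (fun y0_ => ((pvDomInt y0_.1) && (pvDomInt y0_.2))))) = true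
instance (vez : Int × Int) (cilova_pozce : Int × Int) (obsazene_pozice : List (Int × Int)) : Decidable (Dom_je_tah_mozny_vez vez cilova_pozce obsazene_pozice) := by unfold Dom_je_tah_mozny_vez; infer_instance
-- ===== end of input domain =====

-- B replaces A's scan of every path square (each probing the occupied list) by a
-- single pass over the occupied positions; same return value everywhere (alternative decomposition).

-- ===== PORT A =====
def je_tah_mozny_vez (vez : Int × Int) (cilova_pozce : Int × Int) (obsazene_pozice : List (Int × Int)) : Bool :=
  let r := vez.1; let s := vez.2
  let r2 := cilova_pozce.1; let s2 := cilova_pozce.2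
  if obsazene_pozice.contains (r2, s2) then false
  else if r != r2 && s != s2 then false
  else if r == r2 then
    -- for i in range(min(s,s2)+1, max(s,s2)): early return False on hit
    !((PySem.List.pyRange (min s s2 + 1) (max s s2) 1).any
        (fun i => obsazene_pozice.contains (r, i)))
  else
    !((PySem.List.pyRange (min r r2 + 1) (max r r2) 1).any
        (fun i => obsazene_pozice.contains (i, s)))

-- ===== PORT B =====
def je_tah_mozny_vez_alt (vez : Int × Int) (cilova_pozce : Int × Int) (obsazene_pozice : List (Int × Int)) : Bool :=
  let r := vez.1; let s := vez.2
  let r2 := cilova_pozce.1; let s2 := cilova_pozce.2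
  if r != r2 && s != s2 then false
  else
    -- single pass over obsazene_pozice; early return False on any blocker
    !(obsazene_pozice.any (fun p =>
        (p == (r2, s2)) ||
        (if r == r2 then
           p.1 == r && decide (min s s2 < p.2) && decide (p.2 < max s s2)
         else
           p.2 == s && decide (min r r2 < p.1) && decide (p.1 < max r r2))))

-- ===== PRECONDITION & SPEC =====
def Spec_je_tah_mozny_vez (vez : Int × Int) (cilova_pozce : Int × Int) (obsazene_pozice : List (Int × Int)) (out : Bool) : Prop := out = je_tah_mozny_vez_alt vez cilova_pozce obsazene_pozice
instance (vez : Int × Int) (cilova_pozce : Int × Int) (obsazene_pozice : List (Int × Int)) (out : Bool) : Decidable (Spec_je_tah_mozny_vez vez cilova_pozce obsazene_pozice out) := by unfold Spec_je_tah_mozny_vez; infer_instance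

-- ===== CLAIM =====
def Claim_equal_je_tah_mozny_vez : Prop := ∀ (vez : Int × Int) (cilova_pozce : Int × Int) (obsazene_pozice : List (Int × Int)), Dom_je_tah_mozny_vez vez cilova_pozce obsazene_pozice → Spec_je_tah_mozny_vez vez cilova_pozce obsazene_pozice (je_tah_mozny_vez vez cilova_pozce obsazene_pozice)

-- ===== LEMMAS AND PROOFS =====

-- A's "target occupied, or some strictly-between path square occupied" equals
-- B's one-pass scan, in the column-move (r = r2) case, seen on the s-coordinates.
theorem pv_col_case (r s r2 s2 : Int) (occ : List (Int × Int)) (hr : r = r2) :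
    (occ.contains (r2, s2) ||
      (PySem.List.pyRange (min s s2 + 1) (max s s2) 1).any
        (fun i => occ.contains (r, i)))
    = occ.any (fun p =>
        (p == (r2, s2)) ||
        (p.1 == r && decide (min s s2 < p.2) && decide (p.2 < max s s2))) := by
  subst hr
  rw [Bool.eq_iff_iff]
  simp only [Bool.or_eq_true, List.any_eq_true, List.contains_iff_mem,
    PySem.List.mem_pyRange_one, beq_iff_eq, Bool.and_eq_true, decide_eq_true_eq]
  constructor
  · rintro (h | ⟨i, ⟨h1, h2⟩, hm⟩)
    · exact ⟨(r, s2), h, Or.inl rfl⟩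
    · exact ⟨(r, i), hm, Or.inr ⟨⟨rfl, by omega⟩, h2⟩⟩
  · rintro ⟨⟨a, b⟩, hm, (h | ⟨⟨ha, h1⟩, h2⟩)⟩
    · exact Or.inl (h ▸ hm)
    · exact Or.inr ⟨b, ⟨by omega, h2⟩, ha ▸ hm⟩

-- Same statement for the row-move (s = s2, r ≠ r2) case, on the r-coordinates.
theorem pv_row_case (r s r2 s2 : Int) (occ : List (Int × Int)) (hs : s = s2) :
    (occ.contains (r2, s2) ||
      (PySem.List.pyRange (min r r2 + 1) (max r r2) 1).any
        (fun i => occ.contains (i, s)))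
    = occ.any (fun p =>
        (p == (r2, s2)) ||
        (p.2 == s && decide (min r r2 < p.1) && decide (p.1 < max r r2))) := by
  subst hs
  rw [Bool.eq_iff_iff]
  simp only [Bool.or_eq_true, List.any_eq_true, List.contains_iff_mem,
    PySem.List.mem_pyRange_one, beq_iff_eq, Bool.and_eq_true, decide_eq_true_eq]
  constructor
  · rintro (h | ⟨i, ⟨h1, h2⟩, hm⟩)
    · exact ⟨(r2, s), h, Or.inl rfl⟩
    · exact ⟨(i, s), hm, Or.inr ⟨⟨rfl, by omega⟩, h2⟩⟩
  · rintro ⟨⟨a, b⟩, hm, (h | ⟨⟨hb, h1⟩, h2⟩)⟩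
    · exact Or.inl (h ▸ hm)
    · exact Or.inr ⟨a, ⟨by omega, h2⟩, hb ▸ hm⟩

-- ===== VERDICT =====
theorem je_tah_mozny_vez_spec : Claim_equal_je_tah_mozny_vez := by
  intro ⟨r, s⟩ ⟨r2, s2⟩ occ _
  unfold Spec_je_tah_mozny_vez je_tah_mozny_vez je_tah_mozny_vez_alt
  by_cases hcl : (r != r2 && s != s2) = true
  · simp [hcl]
  · have hcl' : (r != r2 && s != s2) = false := eq_false_of_ne_true hcl
    have hdis : r = r2 ∨ s = s2 := by
      rcases Bool.and_eq_false_iff.mp hcl' with h | h <;>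
        simp only [bne_eq_false_iff_eq] at h
      exacts [Or.inl h, Or.inr h]
    by_cases hocc : occ.contains (r2, s2) = true
    · have hb : (occ.any fun p =>
          p == (r2, s2) ||
          (if r == r2 then
             p.1 == r && decide (min s s2 < p.2) && decide (p.2 < max s s2)
           else
             p.2 == s && decide (min r r2 < p.1) && decide (p.1 < max r r2))) = true := by
        rw [List.any_eq_true]
        exact ⟨(r2, s2), List.contains_iff_mem.mp hocc, by simp⟩
      simp only [hocc, if_true, hcl', Bool.false_eq_true, if_false, hb, Bool.not_true]
    · have hocc' : occ.contains (r2, s2) = false := eq_false_of_ne_true hocc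
      by_cases hr : r = r2
      · subst hr
        have hc := pv_col_case r s r s2 occ rfl
        simp only [hocc', Bool.false_or] at hc
        simp only [hocc', Bool.false_eq_true, if_false, hcl', beq_self_eq_true, if_true]
        rw [hc]
      · have hs : s = s2 := hdis.resolve_left hr
        subst hs
        have hc := pv_row_case r s r2 s occ rfl
        simp only [hocc', Bool.false_or] at hc
        have hr' : (r == r2) = false := by simp [hr]
        simp only [hocc', Bool.false_eq_true, if_false, hcl', hr']
        rw [hc]
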